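-- pv_equiv track=rewrite | github.com/TheYakEmperor/babel | update_family_trees.py | get_family_countries
-- ===== SOURCE A (Python) =====
-- def get_family_countries(languoid_id, language_data, child_map):
--     """Recursively collect all unique countries from descendant languages/dialects."""
--     all_countries = set()
--
--     def collect_countries(lid):
--         if lid not in language_data:
--             return
--         data = language_data[lid]
--
--         # If this item has countries, add them
--         countries = data.get('country_ids', '')
--         if countries:
--             for c in countries.split():
--                 all_countries.add(c.strip())
--
--         # Recursively check children
--         if lid in child_map:
--             for child_id in child_map[lid]:
--                 collect_countries(child_id)
--
--     collect_countries(languoid_id)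
--     return sorted(all_countries)
-- ===== SOURCE B (Python) =====
-- def get_family_countries(languoid_id, language_data, child_map):
--     """Iteratively collect all unique countries from descendant languages/dialects
--     using an explicit worklist with a visited set (also terminates on cyclic data)."""
--     seen = set()
--     stack = [languoid_id]
--     result = set()
--     while stack:
--         nid = stack.pop(0)
--         if nid in seen:
--             continue
--         seen.add(nid)
--         if nid not in language_data:
--             continue
--         data = language_data[nid]
--         for tok in data.get('country_ids', '').split():
--             result.add(tok.strip())
--         stack.extend(child_map.get(nid, []))
--     return sorted(result)
-- ===== Notes on version B (the rewrite author's own statement) =====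
-- stated objective: alternative
-- what changed: Replaces the recursive nested helper by an explicit worklist loop with a visited set, collecting countries into a result set and sorting once at the end (the visited set also makes B terminate on cyclic child maps, where A recurses forever).
import Mathlib
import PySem

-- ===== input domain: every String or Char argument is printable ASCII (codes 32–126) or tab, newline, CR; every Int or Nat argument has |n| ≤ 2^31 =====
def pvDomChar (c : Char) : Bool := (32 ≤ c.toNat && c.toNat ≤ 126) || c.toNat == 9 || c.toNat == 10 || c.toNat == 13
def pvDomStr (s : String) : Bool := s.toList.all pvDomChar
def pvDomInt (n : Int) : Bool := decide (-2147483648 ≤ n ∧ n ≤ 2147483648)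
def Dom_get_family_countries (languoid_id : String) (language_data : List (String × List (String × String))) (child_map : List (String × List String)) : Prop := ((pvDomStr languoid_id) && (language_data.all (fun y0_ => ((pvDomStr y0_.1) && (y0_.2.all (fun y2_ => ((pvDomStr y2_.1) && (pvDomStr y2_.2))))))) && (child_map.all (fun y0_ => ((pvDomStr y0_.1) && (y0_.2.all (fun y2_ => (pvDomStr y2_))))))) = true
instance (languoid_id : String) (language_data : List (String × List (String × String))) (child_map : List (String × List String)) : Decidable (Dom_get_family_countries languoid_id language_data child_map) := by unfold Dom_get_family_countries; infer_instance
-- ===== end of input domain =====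

-- B replaces A's recursive nested helper by an explicit worklist loop with a visited set
-- (same sorted result on every input where A returns; the visited set also lets B return on cyclic child maps, where A raises RecursionError).


-- ===== PORT A =====
-- A's recursion carries no visited set, so on cyclic data it does not terminate (Python: RecursionError).
-- The Lean port therefore threads a path budget (initially all language_data keys, the current node erased
-- before recursing into its children) purely as a TERMINATION guard: under Pre_ (acyclic reachable part)
-- the `else acc` branch is never taken, which the proofs below establish.
mutual
def pvCollectA (LD : List (String × List (String × String))) (CM : List (String × List String))
    (budget : List String) (lid : String) (acc : PySem.Set String) : PySem.Set String :=
  match (PySem.Dict.mk LD).get? lid with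
  | none => acc
  | some data =>
    if h : lid ∈ budget then
      let countries := (PySem.Dict.mk data).getD "country_ids" ""
      let acc1 := if countries ≠ "" then
          (PySem.Str.split₀ countries).foldl (fun s c => PySem.Set.add s (PySem.Str.strip c)) acc
        else acc
      match (PySem.Dict.mk CM).get? lid with
      | some chs => pvCollectManyA LD CM (budget.erase lid) chs acc1
      | none => acc1
    else acc
termination_by (budget.length, 0)
decreasing_by
  exact Prod.Lex.left _ _ (by simpa using List.length_erase_of_mem h ▸ Nat.sub_lt (List.length_pos_of_mem h) one_pos)

def pvCollectManyA (LD : List (String × List (String × String))) (CM : List (String × List String))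
    (budget : List String) (cs : List String) (acc : PySem.Set String) : PySem.Set String :=
  match cs with
  | [] => acc
  | c :: rest => pvCollectManyA LD CM budget rest (pvCollectA LD CM budget c acc)
termination_by (budget.length, cs.length + 1)
decreasing_by
  · exact Prod.Lex.right _ (by simp)
  · exact Prod.Lex.right _ (by simp)
end

def get_family_countries (languoid_id : String) (language_data : List (String × List (String × String))) (child_map : List (String × List String)) : List String :=
  PySem.List.sorted
    (pvCollectA language_data child_map (language_data.map Prod.fst) languoid_id PySem.Set.empty)
    (fun x => x)

-- ===== PORT B =====
-- helpers cited by pvLoopB's decreasing_by (a lemma the port needs for termination may stay above the claim block)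
theorem pvNotKey_of_get?_none {ν : Type} {LD : List (String × ν)} {n : String}
    (h : (PySem.Dict.mk LD).get? n = none) : n ∉ LD.map Prod.fst := by
  have := (PySem.Dict.get?_eq_none_iff_not_mem_keys (d := PySem.Dict.mk LD) (k := n)).mp h
  simpa [PySem.Dict.keys] using this

theorem pvKey_of_get?_some {ν : Type} {LD : List (String × ν)} {n : String} {v : ν}
    (h : (PySem.Dict.mk LD).get? n = some v) : n ∈ LD.map Prod.fst := by
  have := PySem.Dict.mem_keys_of_mem_items (PySem.Dict.mk LD) (PySem.Dict.mem_items_of_get?_eq_some _ h)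
  simpa [PySem.Dict.keys] using this

theorem pvFilterConsEq (l V : List String) (n : String) (hn : n ∉ l) :
    (l.filter (fun k => decide (k ∉ n :: V))).length = (l.filter (fun k => decide (k ∉ V))).length := by
  congr 1
  apply List.filter_congr
  intro x hx
  have : x ≠ n := fun h => hn (h ▸ hx)
  simp [this]

theorem pvFilterConsLt (l V : List String) (n : String) (hn : n ∈ l) (hv : n ∉ V) :
    (l.filter (fun k => decide (k ∉ n :: V))).length < (l.filter (fun k => decide (k ∉ V))).length := by
  induction l with
  | nil => cases hn
  | cons a l ih =>
    by_cases han : a = n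
    · subst han
      simp only [List.filter_cons]
      have h1 : (decide (a ∉ a :: V)) = false := by simp
      have h2 : (decide (a ∉ V)) = true := by simpa using hv
      rw [h1, h2]
      simp only [List.length_cons]
      calc (l.filter (fun k => decide (k ∉ a :: V))).length
          ≤ (l.filter (fun k => decide (k ∉ V))).length := by
            apply List.Sublist.length_le
            apply List.monotone_filter_right
            intro x hx
            simp only [decide_eq_true_eq] at hx ⊢
            exact fun hxv => hx (List.mem_cons_of_mem _ hxv)
        _ < (l.filter (fun k => decide (k ∉ V))).length + 1 := Nat.lt_succ_self _
    · rcases List.mem_cons.mp hn with h | h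
      · exact absurd h.symm han
      · have := ih h
        simp only [List.filter_cons]
        by_cases hav : a ∈ V
        · have : (decide (a ∉ a :: V)) = false := by simp
          have h1 : (decide (a ∉ n :: V)) = false := by simp [hav]
          have h2 : (decide (a ∉ V)) = false := by simpa using hav
          rw [h1, h2]; exact ih h
        · have h1 : (decide (a ∉ n :: V)) = true := by simp [hav, han]
          have h2 : (decide (a ∉ V)) = true := by simpa using hav
          rw [h1, h2]
          simpa using ih h

def pvLoopB (LD : List (String × List (String × String))) (CM : List (String × List String))
    (visited stack : List String) (acc : PySem.Set String) : PySem.Set String :=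
  match stack with
  | [] => acc
  | n :: rest =>
    if hv : n ∈ visited then
      pvLoopB LD CM visited rest acc
    else
      match hld : (PySem.Dict.mk LD).get? n with
      | none => pvLoopB LD CM (n :: visited) rest acc
      | some data =>
        pvLoopB LD CM (n :: visited) (rest ++ (PySem.Dict.mk CM).getD n [])
          ((PySem.Str.split₀ ((PySem.Dict.mk data).getD "country_ids" "")).foldl
            (fun s c => PySem.Set.add s (PySem.Str.strip c)) acc)
termination_by ( ((LD.map Prod.fst).filter (fun k => decide (k ∉ visited))).length, stack.length )
decreasing_by
  · exact Prod.Lex.right _ (by simp)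
  · rw [pvFilterConsEq (List.map Prod.fst LD) visited n (pvNotKey_of_get?_none hld)]
    exact Prod.Lex.right _ (by simp)
  · exact Prod.Lex.left _ _ (pvFilterConsLt _ _ _ (pvKey_of_get?_some hld) hv)

def get_family_countries_alt (languoid_id : String) (language_data : List (String × List (String × String))) (child_map : List (String × List String)) : List String :=
  PySem.List.sorted (pvLoopB language_data child_map [] [languoid_id] PySem.Set.empty) (fun x => x)

-- ===== PRECONDITION & SPEC =====
-- successors of a node: its child_map children, but only when the node is present in language_data
def pvSuccs (LD : List (String × List (String × String))) (CM : List (String × List String)) (n : String) : List String :=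
  if ((PySem.Dict.mk LD).get? n).isSome then (PySem.Dict.mk CM).getD n [] else []

def pvExpand (LD : List (String × List (String × String))) (CM : List (String × List String)) (R : List String) : List String :=
  PySem.List.dedup (R ++ R.flatMap (pvSuccs LD CM))

-- all nodes reachable from a through language_data-present nodes (saturated bounded iteration of one-step expansion)
def pvReach (LD : List (String × List (String × String))) (CM : List (String × List String)) (a : String) : List String :=
  (pvExpand LD CM)^[(CM.map Prod.snd).flatten.length + 1] [a]

-- Pre_ excludes exactly the inputs on which A's unbounded recursion never returns (Python RecursionError):
-- those where some node reachable from languoid_id through language_data-present nodes lies on a cycle.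
def Pre_get_family_countries (languoid_id : String) (language_data : List (String × List (String × String))) (child_map : List (String × List String)) : Prop :=
  ∀ n ∈ pvReach language_data child_map languoid_id,
    ∀ c ∈ pvSuccs language_data child_map n, n ∉ pvReach language_data child_map c
instance (languoid_id : String) (language_data : List (String × List (String × String))) (child_map : List (String × List String)) : Decidable (Pre_get_family_countries languoid_id language_data child_map) := by unfold Pre_get_family_countries; infer_instance

def pvWitness_get_family_countries : String × (List (String × List (String × String))) × (List (String × List String)) :=
  ("x", [("x", [("country_ids", "US FR")]), ("y", [("country_ids", "DE")])], [("x", ["y"])])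

def Spec_get_family_countries (languoid_id : String) (language_data : List (String × List (String × String))) (child_map : List (String × List String)) (out : List String) : Prop := out = get_family_countries_alt languoid_id language_data child_map
instance (languoid_id : String) (language_data : List (String × List (String × String))) (child_map : List (String × List String)) (out : List String) : Decidable (Spec_get_family_countries languoid_id language_data child_map out) := by unfold Spec_get_family_countries; infer_instance

-- ===== CLAIM (what is proved, stated in full; the proofs are below) =====
def Claim_equal_get_family_countries : Prop := ∀ (languoid_id : String) (language_data : List (String × List (String × String))) (child_map : List (String × List String)), Dom_get_family_countries languoid_id language_data child_map → Pre_get_family_countries languoid_id language_data child_map → Spec_get_family_countries languoid_id language_data child_map (get_family_countries languoid_id language_data child_map)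

-- ===== LEMMAS AND PROOFS =====

-- the edge relation of the traversal: c is a child (via child_map) of a node present in language_data
def pvEdge (LD : List (String × List (String × String))) (CM : List (String × List String)) (a b : String) : Prop :=
  b ∈ pvSuccs LD CM a

-- the country tokens a single node contributes
def pvTokens (LD : List (String × List (String × String))) (m : String) : List String :=
  match (PySem.Dict.mk LD).get? m with
  | none => []
  | some data => (PySem.Str.split₀ ((PySem.Dict.mk data).getD "country_ids" "")).map PySem.Str.strip

theorem pvMemFoldAdd (l : List String) (acc : PySem.Set String) (x : String) :
    x ∈ l.foldl (fun s c => PySem.Set.add s (PySem.Str.strip c)) acc ↔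
      x ∈ acc ∨ ∃ c ∈ l, x = PySem.Str.strip c := by
  induction l generalizing acc with
  | nil => simp
  | cons c l ih =>
    simp only [List.foldl_cons, ih, PySem.Set.mem_add, List.mem_cons]
    constructor
    · rintro ((h | h) | ⟨d, hd, hx⟩)
      · exact Or.inl h
      · exact Or.inr ⟨c, Or.inl rfl, h⟩
      · exact Or.inr ⟨d, Or.inr hd, hx⟩
    · rintro (h | ⟨d, (rfl | hd), hx⟩)
      · exact Or.inl (Or.inl h)
      · exact Or.inl (Or.inr hx)
      · exact Or.inr ⟨d, hd, hx⟩

theorem pvNodupFoldAdd (l : List String) (acc : PySem.Set String) (h : acc.Nodup) :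
    (l.foldl (fun s c => PySem.Set.add s (PySem.Str.strip c)) acc).Nodup := by
  induction l generalizing acc with
  | nil => exact h
  | cons c l ih => exact ih _ (PySem.Set.nodup_add _ _ h)

theorem pvSplitEmpty : PySem.Str.split₀ "" = [] := by decide

theorem pvCollapseIf (countries : String) (acc : PySem.Set String) :
    (if countries ≠ "" then
        (PySem.Str.split₀ countries).foldl (fun s c => PySem.Set.add s (PySem.Str.strip c)) acc
      else acc) =
    (PySem.Str.split₀ countries).foldl (fun s c => PySem.Set.add s (PySem.Str.strip c)) acc := by
  by_cases h : countries = ""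
  · subst h; simp [pvSplitEmpty]
  · simp [h]

-- ---- closure (pvReach) : completeness ----
theorem pvExpand_mem (LD : List (String × List (String × String))) (CM : List (String × List String)) (R : List String) (x : String) :
    x ∈ pvExpand LD CM R ↔ x ∈ R ∨ ∃ n ∈ R, x ∈ pvSuccs LD CM n := by
  simp [pvExpand, PySem.List.mem_dedup, List.mem_flatMap]

theorem pvIter_subset_succ (LD : List (String × List (String × String))) (CM : List (String × List String)) (a : String) (k : Nat) :
    ∀ x, x ∈ (pvExpand LD CM)^[k] [a] → x ∈ (pvExpand LD CM)^[k+1] [a] := by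
  intro x hx
  rw [Function.iterate_succ_apply']
  exact (pvExpand_mem _ _ _ _).mpr (Or.inl hx)

theorem pvExpand_mono (LD : List (String × List (String × String))) (CM : List (String × List String)) (S T : List String)
    (h : ∀ x, x ∈ S → x ∈ T) : ∀ x, x ∈ pvExpand LD CM S → x ∈ pvExpand LD CM T := by
  intro x hx
  rcases (pvExpand_mem _ _ _ _).mp hx with h1 | ⟨n, hn, hs⟩
  · exact (pvExpand_mem _ _ _ _).mpr (Or.inl (h _ h1))
  · exact (pvExpand_mem _ _ _ _).mpr (Or.inr ⟨n, h _ hn, hs⟩)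

theorem pvIter_stable (LD : List (String × List (String × String))) (CM : List (String × List String)) (a : String) (k : Nat)
    (h : ∀ x, x ∈ (pvExpand LD CM)^[k+1] [a] ↔ x ∈ (pvExpand LD CM)^[k] [a]) :
    ∀ i x, x ∈ (pvExpand LD CM)^[k+i] [a] ↔ x ∈ (pvExpand LD CM)^[k] [a] := by
  intro i
  induction i with
  | zero => simp
  | succ i ih =>
    intro x
    have : (k + (i+1)) = (k + i) + 1 := by omega
    rw [this, Function.iterate_succ_apply']
    constructor
    · intro hx
      have := pvExpand_mono LD CM _ _ (fun y hy => (ih y).mp hy) x hx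
      rw [← Function.iterate_succ_apply' (pvExpand LD CM) k [a]] at this
      exact (h x).mp this
    · intro hx
      have hx1 : x ∈ (pvExpand LD CM)^[k+1] [a] := (h x).mpr hx
      rw [Function.iterate_succ_apply'] at hx1
      exact pvExpand_mono LD CM _ _ (fun y hy => (ih y).mpr hy) x hx1

theorem pvIter_subset_univ (LD : List (String × List (String × String))) (CM : List (String × List String)) (a : String) (k : Nat) :
    ∀ x, x ∈ (pvExpand LD CM)^[k] [a] → x ∈ a :: (CM.map Prod.snd).flatten := by
  induction k with
  | zero =>
    intro x hx
    have : x = a := by simpa using hx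
    subst this
    exact List.mem_cons_self ..
  | succ k ih =>
    intro x hx
    rw [Function.iterate_succ_apply'] at hx
    rcases (pvExpand_mem _ _ _ _).mp hx with h1 | ⟨n, _, hs⟩
    · exact ih x h1
    · -- x comes from pvSuccs, hence from some child list in CM
      unfold pvSuccs at hs
      split at hs
      · rcases h : (PySem.Dict.mk CM).get? n with _ | l
        · simp [PySem.Dict.getD_of_get?_eq_none _ _ h] at hs
        · rw [PySem.Dict.getD_of_get?_eq_some _ _ h] at hs
          have hit : (n, l) ∈ CM := PySem.Dict.mem_items_of_get?_eq_some _ h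
          exact List.mem_cons_of_mem _ (List.mem_flatten.mpr ⟨l, List.mem_map.mpr ⟨(n, l), hit, rfl⟩, hs⟩)
      · cases hs

theorem pvExists_stable (LD : List (String × List (String × String))) (CM : List (String × List String)) (a : String) :
    ∃ k ≤ (CM.map Prod.snd).flatten.length + 1,
      ∀ x, x ∈ (pvExpand LD CM)^[k+1] [a] ↔ x ∈ (pvExpand LD CM)^[k] [a] := by
  by_contra hno
  push_neg at hno
  have hex : ∀ k, k ≤ (CM.map Prod.snd).flatten.length + 1 →
      ∃ x, x ∈ (pvExpand LD CM)^[k+1] [a] ∧ x ∉ (pvExpand LD CM)^[k] [a] := by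
    intro k hk
    obtain ⟨x, hc⟩ := hno k hk
    rcases hc with ⟨hx1, hx2⟩ | ⟨hx1, hx2⟩
    · exact ⟨x, hx1, hx2⟩
    · exact absurd (pvIter_subset_succ LD CM a k x hx2) hx1
  have key : ∀ k, k ≤ (CM.map Prod.snd).flatten.length + 2 →
      k + 1 ≤ ((pvExpand LD CM)^[k] [a]).toFinset.card := by
    intro k
    induction k with
    | zero => intro _; simp
    | succ k ihk =>
      intro hk
      have hsub : ((pvExpand LD CM)^[k] [a]).toFinset ⊆ ((pvExpand LD CM)^[k+1] [a]).toFinset := by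
        intro y hy
        rw [List.mem_toFinset] at hy ⊢
        exact pvIter_subset_succ LD CM a k y hy
      obtain ⟨x, hx1, hx2⟩ := hex k (by omega)
      have hss : ((pvExpand LD CM)^[k] [a]).toFinset ⊂ ((pvExpand LD CM)^[k+1] [a]).toFinset :=
        (Finset.ssubset_iff_of_subset hsub).mpr ⟨x, List.mem_toFinset.mpr hx1, fun hc => hx2 (List.mem_toFinset.mp hc)⟩
      have := Finset.card_lt_card hss
      have := ihk (by omega)
      omega
  have hbig := key ((CM.map Prod.snd).flatten.length + 2) (by omega)
  have hcardle : (((pvExpand LD CM)^[(CM.map Prod.snd).flatten.length + 2] [a]).toFinset).card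
      ≤ (a :: (CM.map Prod.snd).flatten).length := by
    calc _ ≤ (a :: (CM.map Prod.snd).flatten).toFinset.card := by
            apply Finset.card_le_card
            intro y hy
            rw [List.mem_toFinset] at hy ⊢
            exact pvIter_subset_univ LD CM a _ y hy
      _ ≤ _ := List.toFinset_card_le _
  simp only [List.length_cons] at hcardle
  omega

theorem pvReach_self (LD : List (String × List (String × String))) (CM : List (String × List String)) (a : String) :
    a ∈ pvReach LD CM a := by
  unfold pvReach
  induction ((CM.map Prod.snd).flatten.length + 1) with
  | zero => simp
  | succ k ih => exact pvIter_subset_succ LD CM a k a ih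

theorem pvReach_closed (LD : List (String × List (String × String))) (CM : List (String × List String)) (a : String)
    (n c : String) (hn : n ∈ pvReach LD CM a) (hc : c ∈ pvSuccs LD CM n) : c ∈ pvReach LD CM a := by
  obtain ⟨k, hk, hstab⟩ := pvExists_stable LD CM a
  have h1 : c ∈ (pvExpand LD CM)^[(CM.map Prod.snd).flatten.length + 1 + 1] [a] := by
    rw [Function.iterate_succ_apply']
    exact (pvExpand_mem _ _ _ _).mpr (Or.inr ⟨n, hn, hc⟩)
  have e1 : ∀ x, x ∈ (pvExpand LD CM)^[(CM.map Prod.snd).flatten.length + 1 + 1] [a] ↔ x ∈ (pvExpand LD CM)^[k] [a] := by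
    have h := pvIter_stable LD CM a k hstab ((CM.map Prod.snd).flatten.length + 1 + 1 - k)
    have hidx : k + ((CM.map Prod.snd).flatten.length + 1 + 1 - k) = (CM.map Prod.snd).flatten.length + 1 + 1 := by omega
    rw [hidx] at h; exact h
  have e2 : ∀ x, x ∈ (pvExpand LD CM)^[(CM.map Prod.snd).flatten.length + 1] [a] ↔ x ∈ (pvExpand LD CM)^[k] [a] := by
    have h := pvIter_stable LD CM a k hstab ((CM.map Prod.snd).flatten.length + 1 - k)
    have hidx : k + ((CM.map Prod.snd).flatten.length + 1 - k) = (CM.map Prod.snd).flatten.length + 1 := by omega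
    rw [hidx] at h; exact h
  exact (e2 c).mpr ((e1 c).mp h1)

theorem pvReach_complete (LD : List (String × List (String × String))) (CM : List (String × List String)) (a x : String)
    (h : Relation.ReflTransGen (pvEdge LD CM) a x) : x ∈ pvReach LD CM a := by
  induction h with
  | refl => exact pvReach_self LD CM a
  | tail _ he ih => exact pvReach_closed LD CM a _ _ ih he

-- ---- A's recursion collects exactly the tokens of the reachable nodes ----
theorem pvCollectA_main (LD : List (String × List (String × String))) (CM : List (String × List String)) (r : String)
    (hacyc : ∀ n c, Relation.ReflTransGen (pvEdge LD CM) r n → c ∈ pvSuccs LD CM n →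
      ¬ Relation.ReflTransGen (pvEdge LD CM) c n) :
    ∀ (N : Nat) (budget : List String), budget.length < N →
      (∀ lid acc x, Relation.ReflTransGen (pvEdge LD CM) r lid →
        (∀ k, Relation.ReflTransGen (pvEdge LD CM) lid k → ((PySem.Dict.mk LD).get? k).isSome → k ∈ budget) →
        (x ∈ pvCollectA LD CM budget lid acc ↔
          x ∈ acc ∨ ∃ m, Relation.ReflTransGen (pvEdge LD CM) lid m ∧ x ∈ pvTokens LD m))
      ∧ (∀ cs acc x, (∀ c ∈ cs, Relation.ReflTransGen (pvEdge LD CM) r c) →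
        (∀ c ∈ cs, ∀ k, Relation.ReflTransGen (pvEdge LD CM) c k → ((PySem.Dict.mk LD).get? k).isSome → k ∈ budget) →
        (x ∈ pvCollectManyA LD CM budget cs acc ↔
          x ∈ acc ∨ ∃ c ∈ cs, ∃ m, Relation.ReflTransGen (pvEdge LD CM) c m ∧ x ∈ pvTokens LD m)) := by
  intro N
  induction N with
  | zero => intro budget h; exact absurd h (by omega)
  | succ N ih =>
    intro budget hlen
    have hA : ∀ lid acc x, Relation.ReflTransGen (pvEdge LD CM) r lid →
        (∀ k, Relation.ReflTransGen (pvEdge LD CM) lid k → ((PySem.Dict.mk LD).get? k).isSome → k ∈ budget) →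
        (x ∈ pvCollectA LD CM budget lid acc ↔
          x ∈ acc ∨ ∃ m, Relation.ReflTransGen (pvEdge LD CM) lid m ∧ x ∈ pvTokens LD m) := by
      intro lid acc x hroot hb
      rw [pvCollectA.eq_def]
      cases hld : (PySem.Dict.mk LD).get? lid with
      | none =>
        have hsucc : pvSuccs LD CM lid = [] := by simp [pvSuccs, hld]
        constructor
        · exact Or.inl
        · rintro (h | ⟨m, hrm, ht⟩)
          · exact h
          · rcases Relation.ReflTransGen.cases_head hrm with heq | ⟨c, hc, _⟩
            · subst heq; simp [pvTokens, hld] at ht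
            · rw [pvEdge, hsucc] at hc; cases hc
      | some data =>
        have hlidmem : lid ∈ budget := hb lid Relation.ReflTransGen.refl (by simp [hld])
        have hsucc : pvSuccs LD CM lid = (PySem.Dict.mk CM).getD lid [] := by simp [pvSuccs, hld]
        have htok : ∀ y, (∃ c ∈ PySem.Str.split₀ ((PySem.Dict.mk data).getD "country_ids" ""), y = PySem.Str.strip c) ↔ y ∈ pvTokens LD lid := by
          intro y; simp [pvTokens, hld, List.mem_map, eq_comm]
        simp only [dif_pos hlidmem, pvCollapseIf]
        cases hcm : (PySem.Dict.mk CM).get? lid with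
        | none =>
          rw [pvMemFoldAdd]
          have hsucc0 : pvSuccs LD CM lid = [] := by
            rw [hsucc, PySem.Dict.getD_of_get?_eq_none _ _ hcm]
          constructor
          · rintro (h | hx)
            · exact Or.inl h
            · exact Or.inr ⟨lid, Relation.ReflTransGen.refl, (htok x).mp hx⟩
          · rintro (h | ⟨m, hrm, ht⟩)
            · exact Or.inl h
            · rcases Relation.ReflTransGen.cases_head hrm with heq | ⟨c, hc, _⟩
              · subst heq; exact Or.inr ((htok x).mpr ht)
              · rw [pvEdge, hsucc0] at hc; cases hc
        | some chs =>
          have hchs : pvSuccs LD CM lid = chs := by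
            rw [hsucc, PySem.Dict.getD_of_get?_eq_some _ _ hcm]
          have hErLt : (budget.erase lid).length < N := by
            rw [List.length_erase_of_mem hlidmem]
            have := List.length_pos_of_mem hlidmem
            omega
          have hedge : ∀ c ∈ chs, pvEdge LD CM lid c := by
            intro c hc; rw [pvEdge, hchs]; exact hc
          have hMany := (ih (budget.erase lid) hErLt).2 chs
            ((PySem.Str.split₀ ((PySem.Dict.mk data).getD "country_ids" "")).foldl
              (fun s c => PySem.Set.add s (PySem.Str.strip c)) acc) x
            (fun c hc => hroot.tail (hedge c hc))
            (by
              intro c hc k hrk hk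
              have hlk : Relation.ReflTransGen (pvEdge LD CM) lid k :=
                Relation.ReflTransGen.head (hedge c hc) hrk
              have hkb : k ∈ budget := hb k hlk hk
              have hkne : k ≠ lid := by
                rintro rfl
                exact hacyc k c hroot (by have h2 := hedge c hc; rwa [pvEdge] at h2) hrk
              exact (List.mem_erase_of_ne hkne).mpr hkb)
          rw [hMany, pvMemFoldAdd]
          constructor
          · rintro ((h | hx) | ⟨c, hc, m, hrm, ht⟩)
            · exact Or.inl h
            · exact Or.inr ⟨lid, Relation.ReflTransGen.refl, (htok x).mp hx⟩
            · exact Or.inr ⟨m, Relation.ReflTransGen.head (hedge c hc) hrm, ht⟩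
          · rintro (h | ⟨m, hrm, ht⟩)
            · exact Or.inl (Or.inl h)
            · rcases Relation.ReflTransGen.cases_head hrm with heq | ⟨c, hc, hcm'⟩
              · subst heq; exact Or.inl (Or.inr ((htok x).mpr ht))
              · have hcchs : c ∈ chs := by rw [pvEdge, hchs] at hc; exact hc
                exact Or.inr ⟨c, hcchs, m, hcm', ht⟩
    refine ⟨hA, ?_⟩
    intro cs
    induction cs with
    | nil =>
      intro acc x _ _
      rw [pvCollectManyA]
      simp
    | cons c rest ihc =>
      intro acc x hcs hb'
      rw [pvCollectManyA]
      rw [ihc _ x (fun d hd => hcs d (List.mem_cons_of_mem _ hd))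
        (fun d hd => hb' d (List.mem_cons_of_mem _ hd))]
      rw [hA c acc x (hcs c (List.mem_cons_self ..)) (hb' c (List.mem_cons_self ..))]
      constructor
      · rintro ((h | ⟨m, hrm, ht⟩) | ⟨d, hd, m, hrm, ht⟩)
        · exact Or.inl h
        · exact Or.inr ⟨c, List.mem_cons_self .., m, hrm, ht⟩
        · exact Or.inr ⟨d, List.mem_cons_of_mem _ hd, m, hrm, ht⟩
      · rintro (h | ⟨d, hd, m, hrm, ht⟩)
        · exact Or.inl (Or.inl h)
        · rcases List.mem_cons.mp hd with heq | hd'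
          · subst heq; exact Or.inl (Or.inr ⟨m, hrm, ht⟩)
          · exact Or.inr ⟨d, hd', m, hrm, ht⟩

theorem pvCollectA_nodup (LD : List (String × List (String × String))) (CM : List (String × List String)) :
    ∀ (N : Nat) (budget : List String), budget.length < N →
      (∀ lid acc, acc.Nodup → (pvCollectA LD CM budget lid acc).Nodup)
      ∧ (∀ cs acc, acc.Nodup → (pvCollectManyA LD CM budget cs acc).Nodup) := by
  intro N
  induction N with
  | zero => intro budget h; exact absurd h (by omega)
  | succ N ih =>
    intro budget hlen
    have hA : ∀ lid acc, acc.Nodup → (pvCollectA LD CM budget lid acc).Nodup := by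
      intro lid acc hacc
      rw [pvCollectA.eq_def]
      cases hld : (PySem.Dict.mk LD).get? lid with
      | none => exact hacc
      | some data =>
        simp only []
        split
        · have hacc1 : (if (PySem.Dict.mk data).getD "country_ids" "" ≠ "" then
              (PySem.Str.split₀ ((PySem.Dict.mk data).getD "country_ids" "")).foldl
                (fun s c => PySem.Set.add s (PySem.Str.strip c)) acc
            else acc).Nodup := by
            split
            · exact pvNodupFoldAdd _ _ hacc
            · exact hacc
          rename_i hmem
          have hlt : (budget.erase lid).length < N := by
            rw [List.length_erase_of_mem hmem]
            have := List.length_pos_of_mem hmem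
            omega
          cases hcm : (PySem.Dict.mk CM).get? lid with
          | some chs => exact (ih (budget.erase lid) hlt).2 chs _ hacc1
          | none => exact hacc1
        · exact hacc
    refine ⟨hA, ?_⟩
    intro cs
    induction cs with
    | nil => intro acc hacc; rw [pvCollectManyA]; exact hacc
    | cons c rest ihc =>
      intro acc hacc
      rw [pvCollectManyA]
      exact ihc _ (hA c acc hacc)

-- ---- B's worklist collects exactly the tokens of the reachable nodes ----
-- paths that avoid the visited set V (every node on the path, including the endpoints, is outside V)
inductive pvAvoid (LD : List (String × List (String × String))) (CM : List (String × List String)) (V : List String) : String → String → Prop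
  | refl (a : String) : a ∉ V → pvAvoid LD CM V a a
  | step (a b c : String) : a ∉ V → b ∈ pvSuccs LD CM a → pvAvoid LD CM V b c → pvAvoid LD CM V a c

theorem pvAvoid_not_mem {LD : List (String × List (String × String))} {CM : List (String × List String)} {V : List String}
    {s m : String} (h : pvAvoid LD CM V s m) : s ∉ V := by
  cases h with
  | refl _ h => exact h
  | step _ _ _ h _ _ => exact h

theorem pvAvoid_weaken {LD : List (String × List (String × String))} {CM : List (String × List String)} {V : List String}
    {n s m : String} (h : pvAvoid LD CM (n :: V) s m) : pvAvoid LD CM V s m := by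
  induction h with
  | refl a ha => exact pvAvoid.refl a (fun hx => ha (List.mem_cons_of_mem _ hx))
  | step a b c ha hb _ ih => exact pvAvoid.step a b c (fun hx => ha (List.mem_cons_of_mem _ hx)) hb ih

theorem pvAvoid_narrow {LD : List (String × List (String × String))} {CM : List (String × List String)} {V : List String}
    {s m : String} (h : pvAvoid LD CM V s m) (n : String) :
    pvAvoid LD CM (n :: V) s m ∨ m = n ∨ ∃ b ∈ pvSuccs LD CM n, pvAvoid LD CM (n :: V) b m := by
  induction h with
  | refl a ha =>
    by_cases han : a = n
    · exact Or.inr (Or.inl han)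
    · exact Or.inl (pvAvoid.refl a (by simp [ha, Ne.symm han, han]))
  | step a b c ha hb _ ih =>
    rcases ih with h1 | h2 | ⟨d, hd, hdm⟩
    · by_cases han : a = n
      · exact Or.inr (Or.inr ⟨b, han ▸ hb, h1⟩)
      · exact Or.inl (pvAvoid.step a b c (by simp [ha, han]) hb h1)
    · exact Or.inr (Or.inl h2)
    · exact Or.inr (Or.inr ⟨d, hd, hdm⟩)

theorem pvAvoid_tail {LD : List (String × List (String × String))} {CM : List (String × List String)}
    {a b c : String} (h : pvAvoid LD CM [] a b) (hc : c ∈ pvSuccs LD CM b) : pvAvoid LD CM [] a c := by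
  induction h with
  | refl x hx => exact pvAvoid.step x c c (by simp) hc (pvAvoid.refl c (by simp))
  | step x y z hx hy _ ih => exact pvAvoid.step x y c hx hy (ih hc)

theorem pvAvoid_iff_rtg (LD : List (String × List (String × String))) (CM : List (String × List String)) (a m : String) :
    pvAvoid LD CM [] a m ↔ Relation.ReflTransGen (pvEdge LD CM) a m := by
  constructor
  · intro h
    induction h with
    | refl _ _ => exact Relation.ReflTransGen.refl
    | step x y z _ hy _ ih => exact Relation.ReflTransGen.head hy ih
  · intro h
    induction h with
    | refl => exact pvAvoid.refl a (by simp)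
    | tail _ he ih => exact pvAvoid_tail ih he

theorem pvLoopB_mem (LD : List (String × List (String × String))) (CM : List (String × List String)) :
    ∀ (visited stack : List String) (acc : PySem.Set String) (x : String),
      x ∈ pvLoopB LD CM visited stack acc ↔
        x ∈ acc ∨ ∃ s ∈ stack, ∃ m, pvAvoid LD CM visited s m ∧ x ∈ pvTokens LD m := by
  intro visited stack acc x
  fun_induction pvLoopB LD CM visited stack acc with
  | case1 v a => simp
  | case2 v a n rest hv ih =>
    rw [ih]
    constructor
    · rintro (h | ⟨s, hs, m, hav, ht⟩)
      · exact Or.inl h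
      · exact Or.inr ⟨s, List.mem_cons_of_mem _ hs, m, hav, ht⟩
    · rintro (h | ⟨s, hs, m, hav, ht⟩)
      · exact Or.inl h
      · rcases List.mem_cons.mp hs with rfl | hs'
        · exact absurd hv (pvAvoid_not_mem hav)
        · exact Or.inr ⟨s, hs', m, hav, ht⟩
  | case3 v a n rest hv hld ih =>
    rw [ih]
    constructor
    · rintro (h | ⟨s, hs, m, hav, ht⟩)
      · exact Or.inl h
      · exact Or.inr ⟨s, List.mem_cons_of_mem _ hs, m, pvAvoid_weaken hav, ht⟩
    · rintro (h | ⟨s, hs, m, hav, ht⟩)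
      · exact Or.inl h
      · have hmn : m ≠ n := by
          intro rfl'
          subst rfl'
          simp [pvTokens, hld] at ht
        have hsucc : pvSuccs LD CM n = [] := by simp [pvSuccs, hld]
        rcases List.mem_cons.mp hs with heq | hs'
        · rw [heq] at hav
          rcases pvAvoid_narrow hav n with h1 | h2 | ⟨b, hb, _⟩
          · exact absurd (by exact List.mem_cons_self ..) (pvAvoid_not_mem h1)
          · exact absurd h2 hmn
          · rw [hsucc] at hb; cases hb
        · rcases pvAvoid_narrow hav n with h1 | h2 | ⟨b, hb, _⟩
          · exact Or.inr ⟨s, hs', m, h1, ht⟩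
          · exact absurd h2 hmn
          · rw [hsucc] at hb; cases hb
  | case4 v a n rest hv data hld ih =>
    rw [ih, pvMemFoldAdd]
    have htok : ∀ y, (∃ c ∈ PySem.Str.split₀ ((PySem.Dict.mk data).getD "country_ids" ""), y = PySem.Str.strip c) ↔ y ∈ pvTokens LD n := by
      intro y; simp [pvTokens, hld, List.mem_map, eq_comm]
    have hsucc : pvSuccs LD CM n = (PySem.Dict.mk CM).getD n [] := by simp [pvSuccs, hld]
    constructor
    · rintro ((h | hx) | ⟨s, hs, m, hav, ht⟩)
      · exact Or.inl h
      · exact Or.inr ⟨n, List.mem_cons_self .., n, pvAvoid.refl n hv, (htok x).mp hx⟩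
      · rcases List.mem_append.mp hs with hs' | hs'
        · exact Or.inr ⟨s, List.mem_cons_of_mem _ hs', m, pvAvoid_weaken hav, ht⟩
        · exact Or.inr ⟨n, List.mem_cons_self .., m,
            pvAvoid.step n s m hv (hsucc ▸ hs') (pvAvoid_weaken hav), ht⟩
    · rintro (h | ⟨s, hs, m, hav, ht⟩)
      · exact Or.inl (Or.inl h)
      · rcases List.mem_cons.mp hs with heq | hs'
        · rw [heq] at hav
          rcases pvAvoid_narrow hav n with h1 | h2 | ⟨b, hb, hbm⟩
          · exact absurd (by exact List.mem_cons_self ..) (pvAvoid_not_mem h1)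
          · subst h2; exact Or.inl (Or.inr ((htok x).mpr ht))
          · exact Or.inr ⟨b, List.mem_append_right _ (hsucc ▸ hb), m, hbm, ht⟩
        · rcases pvAvoid_narrow hav n with h1 | h2 | ⟨b, hb, hbm⟩
          · exact Or.inr ⟨s, List.mem_append_left _ hs', m, h1, ht⟩
          · subst h2; exact Or.inl (Or.inr ((htok x).mpr ht))
          · exact Or.inr ⟨b, List.mem_append_right _ (hsucc ▸ hb), m, hbm, ht⟩

theorem pvLoopB_nodup (LD : List (String × List (String × String))) (CM : List (String × List String)) :
    ∀ (visited stack : List String) (acc : PySem.Set String), acc.Nodup → (pvLoopB LD CM visited stack acc).Nodup := by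
  intro visited stack acc
  fun_induction pvLoopB LD CM visited stack acc with
  | case1 => exact fun h => h
  | case2 v a c r h ih => exact ih
  | case3 v a c r h hld ih => exact ih
  | case4 v a c r h data hld ih => exact fun hn => ih (pvNodupFoldAdd _ _ hn)

-- ===== VERDICT (by name: the statement is the Claim_ definition above) =====
theorem get_family_countries_spec : Claim_equal_get_family_countries := by
  intro a LD CM _ hpre
  unfold Spec_get_family_countries get_family_countries get_family_countries_alt
  have hacyc : ∀ n c, Relation.ReflTransGen (pvEdge LD CM) a n → c ∈ pvSuccs LD CM n →
      ¬ Relation.ReflTransGen (pvEdge LD CM) c n := by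
    intro n c hn hc hcn
    exact hpre n (pvReach_complete LD CM a n hn) c hc (pvReach_complete LD CM c n hcn)
  have hA := (pvCollectA_main LD CM a hacyc ((LD.map Prod.fst).length + 1) (LD.map Prod.fst) (by omega)).1
  have hmemA : ∀ x, x ∈ pvCollectA LD CM (LD.map Prod.fst) a PySem.Set.empty ↔
      ∃ m, Relation.ReflTransGen (pvEdge LD CM) a m ∧ x ∈ pvTokens LD m := by
    intro x
    rw [hA a PySem.Set.empty x Relation.ReflTransGen.refl
      (fun k _ hk => by
        rcases Option.isSome_iff_exists.mp hk with ⟨v, hv⟩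
        exact pvKey_of_get?_some hv)]
    simp [PySem.Set.empty]
  have hmemB : ∀ x, x ∈ pvLoopB LD CM [] [a] PySem.Set.empty ↔
      ∃ m, Relation.ReflTransGen (pvEdge LD CM) a m ∧ x ∈ pvTokens LD m := by
    intro x
    rw [pvLoopB_mem LD CM [] [a] PySem.Set.empty x]
    simp only [List.mem_singleton, PySem.Set.empty]
    constructor
    · rintro (h | ⟨s, rfl, m, hav, ht⟩)
      · simp at h
      · exact ⟨m, (pvAvoid_iff_rtg LD CM s m).mp hav, ht⟩
    · rintro ⟨m, hr, ht⟩
      exact Or.inr ⟨a, rfl, m, (pvAvoid_iff_rtg LD CM a m).mpr hr, ht⟩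
  have hperm : (pvCollectA LD CM (LD.map Prod.fst) a PySem.Set.empty).Perm
      (pvLoopB LD CM [] [a] PySem.Set.empty) := by
    apply (List.perm_ext_iff_of_nodup _ _).mpr
    · intro y; rw [hmemA y, hmemB y]
    · exact (pvCollectA_nodup LD CM ((LD.map Prod.fst).length + 1) (LD.map Prod.fst) (by omega)).1 a _ (by simp [PySem.Set.empty])
    · exact pvLoopB_nodup LD CM [] [a] _ (by simp [PySem.Set.empty])
  exact PySem.List.sorted_eq_sorted_of_perm _ _ _ (fun x y h => h) hperm
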